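-- pv_equiv track=rewrite | github.com/weilunn97/Microsoft-OA-2020 | min_steps_balance.py | min_steps_balance
-- ===== SOURCE A (Python) =====
-- from typing import List
--
-- def min_steps_balance(piles: List[int]) -> int:
--     """
--     Time  : O(N log N)
--     Space : O(1), where N = len(s)
--     """
--     # SORT THE PILE
--     piles = sorted(piles, reverse=True)
--
--     # SETUP 2 POINTERS
--     i = 0
--     steps = 0
--
--     while i < len(piles):
--         if piles[i] == piles[-1]:
--             return steps
--         while i < len(piles) - 1 and piles[i] == piles[i + 1]:
--             i += 1
--         steps += i + 1
--         i += 1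
--         i = i
--     return steps
-- ===== SOURCE B (Python) =====
-- from typing import List
--
-- def min_steps_balance(piles: List[int]) -> int:
--     # Each pile must be lowered through every distinct level strictly below it,
--     # so the answer is the sum over all piles of the rank of their value among
--     # the distinct levels sorted ascending.
--     levels = sorted(set(piles))
--     rank = {v: i for i, v in enumerate(levels)}
--     return sum(rank[x] for x in piles)
-- ===== Notes on version B (the rewrite author's own statement) =====
-- stated objective: alternative
-- what changed: Replaces A's two-pointer walk over the fully sorted list, which skips duplicate runs and accumulates a step count at each level boundary, by a per-element rank sum: B ranks the distinct values ascending and returns the sum over all piles of their value's rank.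
import Mathlib
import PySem

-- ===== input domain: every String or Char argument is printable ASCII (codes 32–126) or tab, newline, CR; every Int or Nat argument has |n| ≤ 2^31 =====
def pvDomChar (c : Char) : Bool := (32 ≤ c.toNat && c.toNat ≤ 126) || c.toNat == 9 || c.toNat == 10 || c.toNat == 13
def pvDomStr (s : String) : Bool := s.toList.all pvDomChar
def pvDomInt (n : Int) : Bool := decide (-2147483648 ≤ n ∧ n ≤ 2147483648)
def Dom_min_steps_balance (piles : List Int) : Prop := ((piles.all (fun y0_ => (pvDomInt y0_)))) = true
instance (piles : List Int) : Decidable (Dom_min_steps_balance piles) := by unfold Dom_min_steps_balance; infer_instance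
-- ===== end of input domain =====

-- B replaces A's sorted two-pointer walk that accumulates step counts at each level boundary by a
-- per-element rank sum: each pile contributes the index of its value among the ascending distinct
-- levels (alternative structure, same O(n log n)).

-- ===== PORT A =====
-- inner `while i < len(piles) - 1 and piles[i] == piles[i + 1]: i += 1`
-- (the Python int condition `i < len - 1` is written `i + 1 < len`, identical on the Nat index i;
-- fuel is a pure totality guard: xs.length is always enough for this loop)
def pvASkip (xs : List Int) (fuel : Nat) (i : Nat) : Nat :=
  match fuel with
  | 0 => i
  | Nat.succ fuel =>
    if i + 1 < xs.length ∧
        PySem.List.pyGet? xs (i : Int) = PySem.List.pyGet? xs ((i : Int) + 1) then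
      pvASkip xs fuel (i + 1)
    else i

-- outer while loop of A: early return when piles[i] == piles[-1], else skip the
-- duplicate group, add i + 1 and advance (fuel xs.length + 1 is always enough)
def pvALoop (xs : List Int) (fuel : Nat) (i : Nat) (steps : Int) : Int :=
  match fuel with
  | 0 => steps
  | Nat.succ fuel =>
    if i < xs.length then
      if PySem.List.pyGet? xs (i : Int) = PySem.List.pyGet? xs (-1) then steps
      else pvALoop xs fuel (pvASkip xs xs.length i + 1)
        (steps + ((pvASkip xs xs.length i : Int) + 1))
    else steps

def min_steps_balance (piles : List Int) : Int :=
  pvALoop (PySem.List.sorted piles (fun x => x) true)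
    ((PySem.List.sorted piles (fun x => x) true).length + 1) 0 0

-- ===== PORT B =====
-- `levels = sorted(set(piles))`; `rank = {v: i for i, v in enumerate(levels)}`;
-- `return sum(rank[x] for x in piles)`
def min_steps_balance_alt (piles : List Int) : Int :=
  let levels := PySem.List.sorted (PySem.Set.ofList piles) (fun x => x) false
  let rank := (PySem.List.enumerate levels 0).foldl
      (fun d (p : Int × Int) => d.insert p.2 p.1) PySem.Dict.empty
  piles.foldl (fun s x => s + rank.getD x 0) 0

-- ===== PRECONDITION & SPEC =====
def Spec_min_steps_balance (piles : List Int) (out : Int) : Prop := out = min_steps_balance_alt piles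
instance (piles : List Int) (out : Int) : Decidable (Spec_min_steps_balance piles out) := by unfold Spec_min_steps_balance; infer_instance

-- ===== CLAIM (what is proved, stated in full; the proofs are below) =====
def Claim_equal_min_steps_balance : Prop := ∀ (piles : List Int), Dom_min_steps_balance piles → Spec_min_steps_balance piles (min_steps_balance piles)

-- ===== LEMMAS AND PROOFS =====

-- common yardstick on the sorted-descending list: A's sum, over adjacent unequal pairs,
-- of the left position + 1
def pvS (xs : List Int) (i : Nat) : Int :=
  if h : i + 1 < xs.length then
    (if xs[i]'(by omega) = xs[i + 1]'h then 0 else (i : Int) + 1) + pvS xs (i + 1)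
  else 0
termination_by xs.length - i
decreasing_by omega

theorem pvGet_nat (xs : List Int) (i : Nat) (h : i < xs.length) :
    PySem.List.pyGet? xs (i : Int) = some (xs[i]'h) := by
  rw [PySem.List.pyGet?_natCast, List.getElem?_eq_getElem h]

theorem pvGet_neg_one (xs : List Int) (h : 0 < xs.length) :
    PySem.List.pyGet? xs (-1) = some (xs[xs.length - 1]'(by omega)) := by
  simp only [PySem.List.pyGet?, PySem.List.pyIdx?]
  split
  · omega
  · split
    · simp only [Option.bind]
      rw [List.getElem?_eq_getElem (by omega)]
      congr 1
    · omega

-- a run of equal adjacent values contributes nothing to pvS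
theorem pvS_skip (xs : List Int) :
    ∀ d i k, k - i ≤ d → i ≤ k → (hk : k < xs.length) →
    (∀ p, i ≤ p → (hp : p < k) → xs[p]'(by omega) = xs[p + 1]'(by omega)) →
    pvS xs i = pvS xs k := by
  intro d
  induction d with
  | zero =>
    intro i k hd hik hk heq
    have : i = k := by omega
    rw [this]
  | succ d ih =>
    intro i k hd hik hk heq
    by_cases h : i = k
    · rw [h]
    · have hik' : i < k := by omega
      have h1 : i + 1 < xs.length := by omega
      rw [pvS, dif_pos h1, if_pos (heq i (le_refl i) hik'), zero_add]
      exact ih (i + 1) k (by omega) (by omega) hk (fun p hp1 hp => heq p (by omega) hp)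

-- monotone getElem for sorted-descending lists
def pvMono (xs : List Int) : Prop :=
  ∀ p q, (hpq : p ≤ q) → (hq : q < xs.length) → xs[q]'hq ≤ xs[p]'(by omega)

theorem pvMono_sorted (piles : List Int) :
    pvMono (PySem.List.sorted piles (fun x => x) true) := by
  intro p q hpq hq
  rcases eq_or_lt_of_le hpq with h | h
  · subst h; exact le_refl _
  · exact List.pairwise_iff_getElem.mp
      (PySem.List.sorted_pairwise_rev piles (fun x => x)) p q (by omega) hq h

theorem pvS_zero (xs : List Int) (hm : pvMono xs) (i : Nat) (hi : i < xs.length)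
    (hlast : xs[i]'hi = xs[xs.length - 1]'(by omega)) : pvS xs i = 0 := by
  have heq : ∀ p, i ≤ p → (hp : p < xs.length - 1) → xs[p]'(by omega) = xs[p + 1]'(by omega) := by
    intro p hp1 hp
    have h1 : xs[p + 1]'(by omega) ≤ xs[p]'(by omega) := hm p (p + 1) (by omega) (by omega)
    have h2 : xs[xs.length - 1]'(by omega) ≤ xs[p + 1]'(by omega) :=
      hm (p + 1) (xs.length - 1) (by omega) (by omega)
    have h3 : xs[p]'(by omega) ≤ xs[i]'hi := hm i p hp1 (by omega)
    rw [hlast] at h3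
    exact le_antisymm (h3.trans h2) h1
  rw [pvS_skip xs xs.length i (xs.length - 1) (by omega) (by omega) (by omega) heq,
      pvS, dif_neg (by omega)]

-- what the inner skip loop computes (fuel + 1 ≥ the remaining length suffices)
theorem pvASkip_spec (xs : List Int) :
    ∀ fuel i, xs.length - i ≤ fuel + 1 → i < xs.length →
      pvASkip xs fuel i < xs.length ∧ i ≤ pvASkip xs fuel i ∧
      (∀ p, i ≤ p → p < pvASkip xs fuel i →
        PySem.List.pyGet? xs (p : Int) = PySem.List.pyGet? xs ((p : Int) + 1)) ∧
      (pvASkip xs fuel i + 1 < xs.length →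
        PySem.List.pyGet? xs (pvASkip xs fuel i : Int) ≠
          PySem.List.pyGet? xs ((pvASkip xs fuel i : Int) + 1)) := by
  intro fuel
  induction fuel with
  | zero =>
    intro i hfa hi
    have he : pvASkip xs 0 i = i := rfl
    rw [he]
    refine ⟨hi, le_refl i, ?_, ?_⟩
    · intro p hp1 hp2; omega
    · intro hlt
      exact absurd hlt (by omega)
  | succ fuel ih =>
    intro i hfa hi
    by_cases h : i + 1 < xs.length ∧
        PySem.List.pyGet? xs (i : Int) = PySem.List.pyGet? xs ((i : Int) + 1)
    · have hrw : pvASkip xs (fuel + 1) i = pvASkip xs fuel (i + 1) := by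
        simp only [pvASkip, if_pos h]
      obtain ⟨hlt, hle, heq, hstop⟩ := ih (i + 1) (by omega) h.1
      rw [hrw]
      refine ⟨hlt, by omega, ?_, hstop⟩
      intro p hp1 hp
      rcases Nat.eq_or_lt_of_le hp1 with h' | h'
      · rw [← h']; exact h.2
      · exact heq p (by omega) hp
    · have hrw : pvASkip xs (fuel + 1) i = i := by simp only [pvASkip, if_neg h]
      rw [hrw]
      refine ⟨hi, le_refl i, by omega, ?_⟩
      intro hlt hc
      exact h ⟨hlt, hc⟩

-- values along a run of equal adjacent entries
theorem pvChain (xs : List Int) (i j : Nat) (hij : i ≤ j) (hj : j < xs.length)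
    (heq : ∀ p, i ≤ p → p < j →
      PySem.List.pyGet? xs (p : Int) = PySem.List.pyGet? xs ((p : Int) + 1)) :
    xs[i]'(by omega) = xs[j]'hj := by
  induction j, hij using Nat.le_induction with
  | base => rfl
  | succ k hk ihk =>
    have h1 := heq k hk (by omega)
    have hc : ((k : Int) + 1) = ((k + 1 : Nat) : Int) := by push_cast; ring
    rw [hc, pvGet_nat xs k (by omega), pvGet_nat xs (k + 1) (by omega)] at h1
    rw [ihk (by omega) (fun p hp1 hp2 => heq p hp1 (by omega)), Option.some.inj h1]

theorem pvALoop_eq (xs : List Int) (hm : pvMono xs) :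
    ∀ fuel i steps, xs.length + 1 - i ≤ fuel → pvALoop xs fuel i steps = steps + pvS xs i := by
  intro fuel
  induction fuel with
  | zero =>
    intro i steps hd
    have he : pvALoop xs 0 i steps = steps := rfl
    rw [he, pvS, dif_neg (by omega)]; ring
  | succ fuel ih =>
    intro i steps hd
    by_cases hi : i < xs.length
    · have hlen : 0 < xs.length := by omega
      have hrw : pvALoop xs (fuel + 1) i steps =
          if PySem.List.pyGet? xs (i : Int) = PySem.List.pyGet? xs (-1) then steps
          else pvALoop xs fuel (pvASkip xs xs.length i + 1)
            (steps + ((pvASkip xs xs.length i : Int) + 1)) := by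
        simp only [pvALoop, if_pos hi]
      rw [hrw, pvGet_nat xs i hi, pvGet_neg_one xs hlen]
      by_cases hcase : xs[i]'hi = xs[xs.length - 1]'(by omega)
      · rw [if_pos (congrArg some hcase), pvS_zero xs hm i hi hcase]; ring
      · rw [if_neg (by simpa using hcase)]
        obtain ⟨hjlt, hjle, heq, hstop⟩ := pvASkip_spec xs xs.length i (by omega) hi
        have hval : xs[i]'hi = xs[pvASkip xs xs.length i]'hjlt :=
          pvChain xs i _ hjle hjlt heq
        have hjne : pvASkip xs xs.length i + 1 < xs.length := by
          by_contra hc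
          have hje : pvASkip xs xs.length i = xs.length - 1 := by omega
          apply hcase
          rw [hval]; congr 1
        have hne2 : xs[pvASkip xs xs.length i]'hjlt ≠ xs[pvASkip xs xs.length i + 1]'hjne := by
          intro hcontra
          apply hstop hjne
          have hc : ((pvASkip xs xs.length i : Int) + 1) = ((pvASkip xs xs.length i + 1 : Nat) : Int) := by
            push_cast; ring
          rw [hc, pvGet_nat xs _ hjlt, pvGet_nat xs _ hjne, hcontra]
        have hSi : pvS xs i = pvS xs (pvASkip xs xs.length i) :=
          pvS_skip xs xs.length i (pvASkip xs xs.length i) (by omega) hjle hjlt (fun p hp1 hp => by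
            have h' := heq p hp1 hp
            have hc : ((p : Int) + 1) = ((p + 1 : Nat) : Int) := by push_cast; ring
            rw [hc, pvGet_nat xs p (by omega), pvGet_nat xs (p + 1) (by omega)] at h'
            exact Option.some.inj h')
        have hSj : pvS xs (pvASkip xs xs.length i) =
            ((pvASkip xs xs.length i : Int) + 1) + pvS xs (pvASkip xs xs.length i + 1) := by
          rw [pvS, dif_pos hjne, if_neg hne2]
        rw [ih (pvASkip xs xs.length i + 1)
          (steps + ((pvASkip xs xs.length i : Int) + 1)) (by omega), hSi, hSj]
        ring
    · have he : pvALoop xs (fuel + 1) i steps = steps := by simp only [pvALoop, if_neg hi]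
      rw [he, pvS, dif_neg (by omega)]; ring

theorem pvA_main (piles : List Int) :
    min_steps_balance piles = pvS (PySem.List.sorted piles (fun x => x) true) 0 := by
  have h := pvALoop_eq (PySem.List.sorted piles (fun x => x) true) (pvMono_sorted piles)
    ((PySem.List.sorted piles (fun x => x) true).length + 1) 0 0 (by omega)
  rw [min_steps_balance, h, zero_add]

-- ===== B-side machinery: ranks =====

-- number of level boundaries (adjacent unequal pairs) at or after position i
def pvR (xs : List Int) (i : Nat) : Nat :=
  if h : i + 1 < xs.length then
    (if xs[i]'(by omega) = xs[i + 1]'h then 0 else 1) + pvR xs (i + 1)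
  else 0
termination_by xs.length - i
decreasing_by omega

-- sum of pvR over the positions from i on
def pvSumR (xs : List Int) (i : Nat) : Int :=
  if i < xs.length then (pvR xs i : Int) + pvSumR xs (i + 1) else 0
termination_by xs.length - i
decreasing_by omega

theorem pvR_pos (xs : List Int) (i : Nat) (h1 : i + 1 < xs.length) :
    pvR xs i = (if xs[i]'(by omega) = xs[i + 1]'h1 then 0 else 1) + pvR xs (i + 1) := by
  conv_lhs => rw [pvR]
  rw [dif_pos h1]

theorem pvR_neg (xs : List Int) (i : Nat) (h1 : ¬ i + 1 < xs.length) : pvR xs i = 0 := by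
  rw [pvR, dif_neg h1]

theorem pvSumR_pos (xs : List Int) (i : Nat) (hi : i < xs.length) :
    pvSumR xs i = (pvR xs i : Int) + pvSumR xs (i + 1) := by
  conv_lhs => rw [pvSumR]
  rw [if_pos hi]

theorem pvSumR_neg (xs : List Int) (i : Nat) (hi : ¬ i < xs.length) : pvSumR xs i = 0 := by
  rw [pvSumR, if_neg hi]

-- A's boundary-weighted sum is the rank sum: each boundary at position p is counted
-- once by every position j ≤ p
theorem pvS_eq_sumR (xs : List Int) :
    ∀ d i, xs.length - i ≤ d → pvS xs i = pvSumR xs i + (i : Int) * (pvR xs i : Int) := by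
  intro d
  induction d with
  | zero =>
    intro i hd
    rw [pvS, dif_neg (by omega), pvSumR_neg xs i (by omega), pvR_neg xs i (by omega)]; ring
  | succ d ih =>
    intro i hd
    by_cases h1 : i + 1 < xs.length
    · rw [pvS, dif_pos h1, ih (i + 1) (by omega), pvSumR_pos xs i (by omega),
        pvR_pos xs i h1]
      by_cases hb : xs[i]'(by omega) = xs[i + 1]'h1
      · simp only [if_pos hb]; push_cast; ring
      · simp only [if_neg hb]; push_cast; ring
    · by_cases h0 : i < xs.length
      · rw [pvS, dif_neg h1, pvSumR_pos xs i h0, pvSumR_neg xs (i + 1) (by omega),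
          pvR_neg xs i h1]
        push_cast; ring
      · rw [pvS, dif_neg (by omega), pvSumR_neg xs i h0, pvR_neg xs i (by omega)]
        push_cast; ring

-- dict lookups skip inserts whose keys avoid x
theorem pvGetD_fold_not_mem :
    ∀ (L : List Int) (s : Int) (d : PySem.Dict Int Int) (x : Int), x ∉ L →
    ((PySem.List.enumerate L s).foldl (fun d (p : Int × Int) => d.insert p.2 p.1) d).getD x 0
      = d.getD x 0 := by
  intro L
  induction L with
  | nil => intro s d x _; simp [PySem.List.enumerate_nil]
  | cons a t ih =>
    intro s d x hx
    rw [PySem.List.enumerate_cons, List.foldl_cons,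
      ih (s + 1) _ x (fun h => hx (List.mem_cons_of_mem a h)),
      PySem.Dict.getD_insert_of_ne]
    intro h
    exact hx (h ▸ List.mem_cons_self)

-- the rank dict of an enumerated nodup list maps each element to start + its index
theorem pvGetD_rankDict :
    ∀ (L : List Int) (s : Int) (d : PySem.Dict Int Int) (x : Int), L.Nodup → x ∈ L →
    ((PySem.List.enumerate L s).foldl (fun d (p : Int × Int) => d.insert p.2 p.1) d).getD x 0
      = s + (L.idxOf x : Int) := by
  intro L
  induction L with
  | nil => intro s d x _ hx; exact absurd hx List.not_mem_nil
  | cons a t ih =>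
    intro s d x hnd hx
    rw [PySem.List.enumerate_cons, List.foldl_cons]
    by_cases hxa : x = a
    · subst hxa
      rw [pvGetD_fold_not_mem t (s + 1) _ x (List.nodup_cons.mp hnd).1,
        PySem.Dict.getD_insert_self, List.idxOf_cons_self]
      ring
    · have hxt : x ∈ t := by
        rcases List.mem_cons.mp hx with h | h
        · exact absurd h hxa
        · exact h
      rw [ih (s + 1) _ x (List.nodup_cons.mp hnd).2 hxt,
        List.idxOf_cons_ne t (fun h => hxa h.symm)]
      push_cast [Nat.succ_eq_add_one]; ring

-- in a strictly increasing list, the index of an element counts the smaller elements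
theorem pvIdxOf_eq_countP :
    ∀ (L : List Int), L.Pairwise (· < ·) → ∀ x ∈ L,
    L.idxOf x = L.countP (fun w => decide (w < x)) := by
  intro L
  induction L with
  | nil => intro _ x hx; exact absurd hx List.not_mem_nil
  | cons a t ih =>
    intro hp x hx
    obtain ⟨ha, hp'⟩ := List.pairwise_cons.mp hp
    by_cases hxa : x = a
    · subst hxa
      rw [List.idxOf_cons_self, List.countP_cons, if_neg (by simp),
        List.countP_eq_zero.mpr (fun w hw => by
          simp only [decide_eq_true_eq]
          have := ha w hw
          omega)]
    · have hxt : x ∈ t := by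
        rcases List.mem_cons.mp hx with h | h
        · exact absurd h hxa
        · exact h
      rw [List.idxOf_cons_ne t (fun h => hxa h.symm), List.countP_cons,
        if_pos (by simp only [decide_eq_true_eq]; exact ha x hxt), ih hp' x hxt]

-- split the count below a at b < a
theorem pvCountP_split (L : List Int) (a b : Int) (hba : b < a) :
    L.countP (fun w => decide (w < a)) =
      L.countP (fun w => decide (w < b)) +
        L.countP (fun w => decide (b ≤ w) && decide (w < a)) := by
  induction L with
  | nil => simp
  | cons w t ih =>
    simp only [List.countP_cons, ih]
    by_cases h1 : w < a <;> by_cases h2 : w < b <;> by_cases h3 : b ≤ w <;>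
      simp [h1, h2, h3] <;> omega

-- with no level strictly between b and a, exactly one level (b itself) lies in [b, a)
theorem pvCount_between (L : List Int) (a b : Int) (hnd : L.Nodup) (hb : b ∈ L) (hba : b < a)
    (hno : ∀ w ∈ L, w < a → w ≤ b) :
    L.countP (fun w => decide (b ≤ w) && decide (w < a)) = 1 := by
  have hcongr : L.countP (fun w => decide (b ≤ w) && decide (w < a))
      = L.countP (fun w => w == b) := by
    apply List.countP_congr
    intro w hw
    simp only [Bool.and_eq_true, decide_eq_true_eq, beq_iff_eq]
    constructor
    · rintro ⟨hl, hr⟩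
      exact le_antisymm (hno w hw hr) hl
    · rintro rfl
      exact ⟨le_refl _, hba⟩
  rw [hcongr]
  simpa [List.count_eq_countP] using List.count_eq_one_of_mem hnd hb

-- the rank of xs[j] among the distinct levels equals the boundary count after j
theorem pvR_eq_countP (xs : List Int) (levels : List Int) (hm : pvMono xs)
    (hnd : levels.Nodup) (hmem : ∀ w, w ∈ levels ↔ w ∈ xs) :
    ∀ d j, xs.length - j ≤ d → (hj : j < xs.length) →
    levels.countP (fun w => decide (w < xs[j]'hj)) = pvR xs j := by
  intro d
  induction d with
  | zero => intro j hd hj; omega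
  | succ d ih =>
    intro j hd hj
    by_cases h1 : j + 1 < xs.length
    · rw [pvR_pos xs j h1]
      by_cases hb : xs[j]'hj = xs[j + 1]'h1
      · rw [if_pos hb, zero_add, ← ih (j + 1) (by omega) h1]
        simp only [hb]
      · have hlt : xs[j + 1]'h1 < xs[j]'hj :=
          lt_of_le_of_ne (hm j (j + 1) (by omega) h1) (fun h => hb h.symm)
        have hno : ∀ w ∈ levels, w < xs[j]'hj → w ≤ xs[j + 1]'h1 := by
          intro w hw hwlt
          obtain ⟨q, hq, rfl⟩ := List.mem_iff_getElem.mp ((hmem w).mp hw)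
          have hqj : j + 1 ≤ q := by
            by_contra hc
            have := hm q j (by omega) hj
            omega
          exact hm (j + 1) q hqj hq
        rw [if_neg hb,
          pvCountP_split levels (xs[j]'hj) (xs[j + 1]'h1) hlt,
          pvCount_between levels (xs[j]'hj) (xs[j + 1]'h1) hnd
            ((hmem _).mpr (List.getElem_mem h1)) hlt hno,
          ih (j + 1) (by omega) h1]
        omega
    · rw [pvR_neg xs j h1]
      apply List.countP_eq_zero.mpr
      intro w hw
      obtain ⟨q, hq, rfl⟩ := List.mem_iff_getElem.mp ((hmem w).mp hw)
      have hqj : q ≤ j := by omega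
      have := hm q j hqj hj
      simp only [decide_eq_true_eq]
      omega

-- summing a function that agrees with pvR over the tail of xs gives pvSumR
theorem pvSum_drop (xs : List Int) (f : Int → Int)
    (hf : ∀ j, (hj : j < xs.length) → f (xs[j]'hj) = (pvR xs j : Int)) :
    ∀ d i, xs.length - i ≤ d → ((xs.drop i).map f).sum = pvSumR xs i := by
  intro d
  induction d with
  | zero =>
    intro i hd
    rw [List.drop_of_length_le (by omega), pvSumR_neg xs i (by omega)]; rfl
  | succ d ih =>
    intro i hd
    by_cases hi : i < xs.length
    · rw [List.drop_eq_getElem_cons hi, List.map_cons, List.sum_cons, hf i hi,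
        ih (i + 1) (by omega), pvSumR_pos xs i hi]
    · rw [List.drop_of_length_le (by omega), pvSumR_neg xs i hi]; rfl

-- B's per-element sum over piles, computed along the sorted-descending rearrangement
theorem pvB_generic (piles xs : List Int) (f : Int → Int) (hperm : xs.Perm piles)
    (hf : ∀ j, (hj : j < xs.length) → f (xs[j]'hj) = (pvR xs j : Int)) :
    piles.foldl (fun s x => s + f x) 0 = pvSumR xs 0 := by
  rw [PySem.List.foldl_add piles f 0, zero_add, ← List.Perm.sum_eq (List.Perm.map f hperm)]
  simpa using pvSum_drop xs f hf xs.length 0 (by omega)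

theorem pvB_main (piles : List Int) :
    min_steps_balance_alt piles = pvSumR (PySem.List.sorted piles (fun x => x) true) 0 := by
  have hm := pvMono_sorted piles
  have hpl : (PySem.List.sorted (PySem.Set.ofList piles) (fun x => x) false).Pairwise (· < ·) :=
    PySem.List.sorted_ofList_pairwise_lt piles
  have hnd : (PySem.List.sorted (PySem.Set.ofList piles) (fun x => x) false).Nodup :=
    List.Pairwise.imp (fun h => ne_of_lt h) hpl
  have hmem : ∀ w, w ∈ PySem.List.sorted (PySem.Set.ofList piles) (fun x => x) false ↔
      w ∈ PySem.List.sorted piles (fun x => x) true := by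
    intro w
    rw [PySem.List.mem_sorted, PySem.Set.mem_ofList, PySem.List.mem_sorted]
  have hf : ∀ j, (hj : j < (PySem.List.sorted piles (fun x => x) true).length) →
      (((PySem.List.enumerate (PySem.List.sorted (PySem.Set.ofList piles) (fun x => x) false) 0).foldl
        (fun d (p : Int × Int) => d.insert p.2 p.1) PySem.Dict.empty).getD
        ((PySem.List.sorted piles (fun x => x) true)[j]'hj) 0)
      = (pvR (PySem.List.sorted piles (fun x => x) true) j : Int) := by
    intro j hj
    have hx : (PySem.List.sorted piles (fun x => x) true)[j]'hj ∈
        PySem.List.sorted (PySem.Set.ofList piles) (fun x => x) false :=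
      (hmem _).mpr (List.getElem_mem hj)
    rw [pvGetD_rankDict _ 0 _ _ hnd hx, zero_add,
      pvIdxOf_eq_countP _ hpl _ hx,
      pvR_eq_countP (PySem.List.sorted piles (fun x => x) true) _ hm hnd hmem
        (PySem.List.sorted piles (fun x => x) true).length j (by omega) hj]
  show piles.foldl (fun s x => s +
      (((PySem.List.enumerate (PySem.List.sorted (PySem.Set.ofList piles) (fun x => x) false) 0).foldl
        (fun d (p : Int × Int) => d.insert p.2 p.1) PySem.Dict.empty).getD x 0)) 0
    = pvSumR (PySem.List.sorted piles (fun x => x) true) 0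
  exact pvB_generic piles (PySem.List.sorted piles (fun x => x) true) _
    (PySem.List.sorted_perm piles (fun x => x) true) hf

-- ===== VERDICT (by name: the statement is the Claim_ definition above) =====
theorem min_steps_balance_spec : Claim_equal_min_steps_balance := by
  intro piles _
  unfold Spec_min_steps_balance
  rw [pvA_main, pvB_main,
    pvS_eq_sumR (PySem.List.sorted piles (fun x => x) true)
      (PySem.List.sorted piles (fun x => x) true).length 0 (by omega)]
  push_cast
  ring
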